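-- pv_equiv track=rewrite | github.com/moldovancsaba/amanoba_courses | course_quality_daemon/watchdog.py | _parse_etime
-- ===== SOURCE A (Python) =====
-- def _parse_etime(raw: str) -> int:
--     text = str(raw or "").strip()
--     if not text:
--         raise ValueError("missing etime")
--     days = 0
--     clock = text
--     if "-" in text:
--         day_part, clock = text.split("-", 1)
--         days = int(day_part)
--     fields = [int(part) for part in clock.split(":")]
--     if len(fields) == 3:
--         hours, minutes, seconds = fields
--     elif len(fields) == 2:
--         hours = 0
--         minutes, seconds = fields
--     elif len(fields) == 1:
--         hours = 0
--         minutes = 0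
--         seconds = fields[0]
--     else:
--         raise ValueError(f"invalid etime: {raw}")
--     return days * 86400 + hours * 3600 + minutes * 60 + seconds
-- ===== SOURCE B (Python) =====
-- def _parse_etime(raw: str) -> int:
--     text = str(raw or "").strip()
--     if not text:
--         raise ValueError("missing etime")
--     days = 0
--     clock = text
--     if "-" in text:
--         day_part, clock = text.split("-", 1)
--         days = int(day_part)
--     fields = clock.split(":")
--     if len(fields) > 3:
--         raise ValueError(f"invalid etime: {raw}")
--     total = 0
--     for part in fields:
--         total = total * 60 + int(part)
--     return days * 86400 + total
-- ===== Notes on version B (the rewrite author's own statement) =====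
-- stated objective: simpler
-- what changed: Replaces the three-way length branch with named hour/minute/second unpacking by a single Horner-style accumulator loop (total = total*60 + int(part)) over the colon-separated fields.
import Mathlib
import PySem

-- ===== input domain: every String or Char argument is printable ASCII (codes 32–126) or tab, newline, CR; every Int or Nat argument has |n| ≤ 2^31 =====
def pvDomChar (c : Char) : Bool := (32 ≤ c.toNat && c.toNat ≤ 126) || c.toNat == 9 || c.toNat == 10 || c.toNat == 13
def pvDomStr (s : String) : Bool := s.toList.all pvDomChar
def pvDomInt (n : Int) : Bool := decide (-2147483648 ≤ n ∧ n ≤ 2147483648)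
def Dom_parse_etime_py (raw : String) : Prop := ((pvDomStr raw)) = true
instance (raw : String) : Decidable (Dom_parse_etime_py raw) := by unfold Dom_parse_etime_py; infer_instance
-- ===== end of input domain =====

-- B replaces A's three-way length branch (hours/minutes/seconds unpacking) by a single
-- Horner-style accumulator fold over the colon-separated fields; objective: simpler.

-- ===== PORT A =====
-- Shared prefix of both Pythons: strip, then split off the optional day part.
-- ofStr? returns none exactly where Python's int() raises; Pre_ excludes those, the
-- port uses getD 0 there (unreachable inside Pre_).
def pvDayClock (text : String) : Int × String :=
  if PySem.Str.isIn "-" text then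
    match PySem.Str.splitMax? text "-" 1 with
    | some [d, c] => ((PySem.Int.ofStr? d).getD 0, c)
    | _ => (0, text)   -- unreachable: "-" ∈ text means split("-",1) gives exactly two pieces
  else (0, text)

def parse_etime_py (raw : String) : Int :=
  let text := PySem.Str.strip raw
  -- 'if not text: raise ValueError' → outside Pre_
  let dc := pvDayClock text
  let fields := ((PySem.Str.split? dc.2 ":").getD []).map
                  (fun p => (PySem.Int.ofStr? p).getD 0)
  match fields with
  | [h, m, s] => dc.1 * 86400 + h * 3600 + m * 60 + s
  | [m, s]    => dc.1 * 86400 + 0 * 3600 + m * 60 + s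
  | [s]       => dc.1 * 86400 + 0 * 3600 + 0 * 60 + s
  | _ => 0   -- 'raise ValueError(f"invalid etime: {raw}")' → outside Pre_

-- ===== PORT B =====
def parse_etime_py_alt (raw : String) : Int :=
  let text := PySem.Str.strip raw
  let dc := pvDayClock text
  let fields := (PySem.Str.split? dc.2 ":").getD []
  if fields.length > 3 then 0   -- 'raise ValueError' → outside Pre_
  else dc.1 * 86400 +
    fields.foldl (fun total part => total * 60 + (PySem.Int.ofStr? part).getD 0) 0

-- ===== PRECONDITION & SPEC =====
-- Pre_ = exactly the inputs on which A returns: nonempty after strip, the day part (if any)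
-- parses as int, and 1..3 colon fields each parsing as int.  (splitting the clock on colons
-- always yields at least one piece, so '1 ≤ length' excludes no real input.)
def Pre_parse_etime_py (raw : String) : Prop :=
  let text := PySem.Str.strip raw
  let fields := (PySem.Str.split? (pvDayClock text).2 ":").getD []
  text ≠ "" ∧
  (PySem.Str.isIn "-" text = true →
    (PySem.Int.ofStr? (((PySem.Str.splitMax? text "-" 1).getD []).headD "")).isSome = true) ∧
  1 ≤ fields.length ∧ fields.length ≤ 3 ∧
  ∀ f ∈ fields, (PySem.Int.ofStr? f).isSome = true
  -- ofStr?.isSome = the field is accepted by Python's int(): digit strings like '7',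
  -- optionally signed, with surrounding whitespace or single underscores between digits
instance (raw : String) : Decidable (Pre_parse_etime_py raw) := by
  unfold Pre_parse_etime_py; infer_instance

def pvWitness_parse_etime_py : String := "2:03:04"

def Spec_parse_etime_py (raw : String) (out : Int) : Prop := out = parse_etime_py_alt raw
instance (raw : String) (out : Int) : Decidable (Spec_parse_etime_py raw out) := by
  unfold Spec_parse_etime_py; infer_instance

-- ===== CLAIM (what is proved, stated in full; the proofs are below) =====
def Claim_equal_parse_etime_py : Prop := ∀ (raw : String), Dom_parse_etime_py raw → Pre_parse_etime_py raw → Spec_parse_etime_py raw (parse_etime_py raw)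

-- ===== LEMMAS AND PROOFS =====

-- ===== VERDICT (by name: the statement is the Claim_ definition above) =====
theorem parse_etime_py_spec : Claim_equal_parse_etime_py := by
  intro raw _ hpre
  unfold Pre_parse_etime_py at hpre
  unfold Spec_parse_etime_py parse_etime_py parse_etime_py_alt
  simp only at hpre ⊢
  obtain ⟨-, -, h1, h3, -⟩ := hpre
  generalize (pvDayClock (PySem.Str.strip raw)).1 = d at *
  generalize hfs : ((PySem.Str.split? (pvDayClock (PySem.Str.strip raw)).2 ":").getD []) = fs at *
  rcases fs with _ | ⟨a, _ | ⟨b, _ | ⟨c, _ | ⟨e, t⟩⟩⟩⟩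
  · simp at h1
  · simp [List.foldl]; try ring
  · simp [List.foldl]; try ring
  · simp [List.foldl]; try ring
  · simp at h3; omega
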